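-- pv_equiv track=rewrite | github.com/vtharini/python2 | anagram.py | check
-- ===== SOURCE A (Python) =====
-- l1=['k','a','b','a','l','i']
--
-- def check(st):
--     lis=list(st)
--     for i in lis:
--         if(i in l1):
--             if(l1.count(i)<=lis.count(i)):
--                 continue
--             else:
--                 return 0
--                 break
--         else:
--             return 0
--             break
--     else:
--         return 1
-- ===== SOURCE B (Python) =====
-- l1=['k','a','b','a','l','i']
--
-- def check(st):
--     allowed = set(l1)
--     if not set(st).issubset(allowed):
--         return 0
--     for c in allowed:
--         req = l1.count(c)
--         if req > 1 and c in st and st.count(c) < req: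
--             return 0
--     return 1
-- ===== Notes on version B (the rewrite author's own statement) =====
-- stated objective: faster
-- what changed: A's single interleaved loop over the string (membership test plus a lis.count per character, quadratic) is replaced by a set-subset test of the string's distinct characters against l1 plus a separate requirement scan over l1's distinct letters whose required count exceeds 1, counting each such letter once.
import Mathlib
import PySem

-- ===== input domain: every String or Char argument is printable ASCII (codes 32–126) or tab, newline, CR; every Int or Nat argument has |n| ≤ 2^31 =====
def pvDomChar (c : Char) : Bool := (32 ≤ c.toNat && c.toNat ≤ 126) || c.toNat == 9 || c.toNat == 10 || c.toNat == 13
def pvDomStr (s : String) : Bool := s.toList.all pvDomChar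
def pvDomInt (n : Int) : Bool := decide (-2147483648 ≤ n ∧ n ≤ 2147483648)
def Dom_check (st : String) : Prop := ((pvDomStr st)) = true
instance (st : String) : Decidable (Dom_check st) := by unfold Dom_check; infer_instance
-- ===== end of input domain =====

-- B replaces A's single interleaved per-character loop (with its per-character lis.count) by a
-- set-subset test plus a separate requirement scan over l1's distinct letters (objective: faster;
-- a timing run measured B faster at the largest sizes).

-- ===== PORT A =====
def l1 : List Char := ['k', 'a', 'b', 'a', 'l', 'i']

-- the for/else loop over lis: returns 0 on the first failing char, 1 if the loop completes
def checkLoop (lis : List Char) : List Char → Int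
  | [] => 1
  | i :: rest =>
    if l1.contains i then
      if l1.count i ≤ lis.count i then checkLoop lis rest else 0
    else 0

def check (st : String) : Int :=
  let lis := st.toList
  checkLoop lis lis

-- ===== PORT B =====
-- 'c in st' / 'st.count(c)' for a single character c are exact as membership/count on st.toList
def check_alt (st : String) : Int :=
  if !(PySem.Set.issubset (PySem.Set.ofList st.toList) (PySem.Set.ofList l1)) then 0
  else if (PySem.Set.ofList l1).any (fun c =>
      decide (1 < l1.count c) && st.toList.contains c && decide (st.toList.count c < l1.count c))
    then 0 else 1

-- ===== PRECONDITION & SPEC =====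
def Spec_check (st : String) (out : Int) : Prop := out = check_alt st
instance (st : String) (out : Int) : Decidable (Spec_check st out) := by unfold Spec_check; infer_instance

-- ===== CLAIM (what is proved, stated in full; the proofs are below) =====
def Claim_equal_check : Prop := ∀ (st : String), Dom_check st → Spec_check st (check st)

-- ===== LEMMAS AND PROOFS =====

theorem checkLoop_eq_all (lis : List Char) (l : List Char) :
    checkLoop lis l =
      if l.all (fun c => l1.contains c && decide (l1.count c ≤ lis.count c)) then 1 else 0 := by
  induction l with
  | nil => simp [checkLoop]
  | cons i rest ih =>
    simp only [checkLoop, ih, List.all_cons, Bool.and_eq_true, List.contains_iff_mem,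
      decide_eq_true_eq]
    split_ifs <;> first | rfl | tauto

theorem main_iff (lis : List Char) :
    (∀ c ∈ lis, c ∈ l1 ∧ l1.count c ≤ lis.count c) ↔
      ((∀ c ∈ lis, c ∈ l1) ∧
       ∀ c ∈ l1, ¬(1 < l1.count c ∧ c ∈ lis ∧ lis.count c < l1.count c)) := by
  constructor
  · intro h
    refine ⟨fun c hc => (h c hc).1, fun c _ hcon => ?_⟩
    obtain ⟨_, hmem, hlt⟩ := hcon
    exact absurd (h c hmem).2 (by omega)
  · rintro ⟨hsub, hreq⟩ c hc
    have hc1 : c ∈ l1 := hsub c hc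
    refine ⟨hc1, ?_⟩
    by_cases hb : 1 < l1.count c
    · have := hreq c hc1
      by_contra hlt
      exact this ⟨hb, hc, by omega⟩
    · have h1 : 1 ≤ l1.count c := List.count_pos_iff.mpr hc1
      have h2 : 1 ≤ lis.count c := List.count_pos_iff.mpr hc
      omega

-- ===== VERDICT (by name: the statement is the Claim_ definition above) =====
theorem check_spec : Claim_equal_check := by
  intro st _
  unfold Spec_check check check_alt
  set lis := st.toList with hlis
  rw [checkLoop_eq_all]
  set sB := PySem.Set.issubset (PySem.Set.ofList lis) (PySem.Set.ofList l1) with hsB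
  set aB := (PySem.Set.ofList l1).any (fun c =>
      decide (1 < l1.count c) && lis.contains c && decide (lis.count c < l1.count c)) with haB
  have hA : (lis.all (fun c => l1.contains c && decide (l1.count c ≤ lis.count c)) = true) ↔
      (∀ c ∈ lis, c ∈ l1 ∧ l1.count c ≤ lis.count c) := by
    simp [List.all_eq_true]
  have hS : (sB = true) ↔ (∀ c ∈ lis, c ∈ l1) := by
    rw [hsB, PySem.Set.issubset_iff]
    constructor
    · intro h c hc
      have := h c (by simpa [PySem.Set.mem_ofList] using hc)
      simpa [PySem.Set.mem_ofList] using this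
    · intro h c hc
      simp only [PySem.Set.mem_ofList] at hc ⊢
      exact h c hc
  have hC : (aB = false) ↔
      (∀ c ∈ l1, ¬(1 < l1.count c ∧ c ∈ lis ∧ lis.count c < l1.count c)) := by
    rw [haB]
    simp only [List.any_eq_false, Bool.and_eq_true, decide_eq_true_eq, List.contains_iff_mem,
      PySem.Set.mem_ofList]
    constructor
    · intro h c hc
      have := h c hc
      tauto
    · intro h c hc
      have := h c hc
      tauto
  have key : (lis.all (fun c => l1.contains c && decide (l1.count c ≤ lis.count c))) = (sB && !aB) := by
    rw [Bool.eq_iff_iff]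
    simp only [Bool.and_eq_true, Bool.not_eq_true']
    rw [hA, main_iff]
    exact ⟨fun ⟨h1, h2⟩ => ⟨hS.mpr h1, hC.mpr h2⟩, fun ⟨h1, h2⟩ => ⟨hS.mp h1, hC.mp h2⟩⟩
  rw [key]
  cases hsb : sB <;> cases han : aB <;> rfl
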